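-- pv_equiv track=rewrite | github.com/holylovenia/Seleksi-1-Asisten-LabPro-2018 | src/5-Problem06.py | cek_orthogonal
-- ===== SOURCE A (Python) =====
-- def transpose (matriks) :
--     temp = [[0 for i in range(len(matriks))] for j in range(len(matriks))]
--     for i in range(len(matriks)) :
--         for j in range(len(matriks)) :
--             temp[i][j] = matriks[j][i]
--
--     return temp
--
-- def kaliMatriks (mat1,mat2) :
--     temp = [[0 for i in range(len(mat1))] for j in range(len(mat2))]
--
--     for i in range(len(mat1)) :
--         for j in range(len(mat2)) :
--             for k in range(len(mat1)) :
--                 temp[i][j] += int(mat1[i][k]) * int(mat2[k][j])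
--
--     return temp
--
-- def cek_orthogonal (matriks) :
--     mat_trans = transpose(matriks)
--     hasil = kaliMatriks(matriks,mat_trans)
--     check = 0
--     i=0
--     j=0
--     while ((i<len(matriks)) and (check == 0)) :
--         if (i == j) :
--             if (hasil[i][j] != 1) :
--                 check = 1
--         else :
--             if (hasil[i][j] != 0) :
--                 check = 1
--         if (j == len(matriks)-1) :
--             i += 1
--             j = 0
--         else :
--             j += 1
--     if (check == 0) :
--         return 'Yes'
--     else :
--         return 'No'
-- ===== SOURCE B (Python) =====
-- def cek_orthogonal(matriks):
--     n = len(matriks)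
--     for i in range(n):
--         for j in range(n):
--             s = sum(int(matriks[i][k]) * int(matriks[j][k]) for k in range(n))
--             if s != (1 if i == j else 0):
--                 return 'No'
--     return 'Yes'
-- ===== Notes on version B (the rewrite author's own statement) =====
-- stated objective: simpler
-- what changed: Drops the transpose() and kaliMatriks() helpers and the stored n*n product matrix: one fused double loop computes each row-pair dot product directly and returns 'No' at the first mismatch (early exit), instead of always building the full transpose and product first.
import Mathlib
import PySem

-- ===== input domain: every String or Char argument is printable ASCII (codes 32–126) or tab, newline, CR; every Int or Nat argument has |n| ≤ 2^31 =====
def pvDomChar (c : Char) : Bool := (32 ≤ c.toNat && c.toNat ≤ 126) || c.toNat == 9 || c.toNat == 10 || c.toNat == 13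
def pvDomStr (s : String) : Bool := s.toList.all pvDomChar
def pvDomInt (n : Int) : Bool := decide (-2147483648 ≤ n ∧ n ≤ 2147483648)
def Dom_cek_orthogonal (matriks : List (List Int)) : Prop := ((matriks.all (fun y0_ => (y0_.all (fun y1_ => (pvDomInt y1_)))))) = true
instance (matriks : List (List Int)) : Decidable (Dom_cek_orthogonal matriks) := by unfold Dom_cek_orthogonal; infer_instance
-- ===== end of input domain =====

-- B drops the transpose/product helpers and the stored n*n product matrix, fusing build and check
-- into one early-exit double loop over row-pair dot products (objective: simpler; return value only).

-- shared indexing helper: m[i][j] for in-range Python indices (Pre_ guarantees 0 ≤ i,j < row length)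
def pvIdx (m : List (List Int)) (i j : Nat) : Int := (m.getD i []).getD j 0

-- ===== PORT A =====
-- transpose(): builds an n*n table temp with temp[i][j] = matriks[j][i]
def transposeA (m : List (List Int)) : List (List Int) :=
  (List.range m.length).map (fun i => (List.range m.length).map (fun j => pvIdx m j i))

-- kaliMatriks(): fills temp[i][j] (i < len(mat1), j < len(mat2)) by the inner k-accumulation;
-- exact for the square use here (len(mat1) = len(mat2), so the zero table is exactly the filled cells)
def kaliMatriksA (mat1 mat2 : List (List Int)) : List (List Int) :=
  (List.range mat1.length).map (fun i =>
    (List.range mat2.length).map (fun j =>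
      (List.range mat1.length).foldl (fun acc k => acc + pvIdx mat1 i k * pvIdx mat2 k j) 0))

-- the while loop: row-major scan of hasil, check flag becomes 1 at the first bad cell;
-- fuel = n*n+1 bounds the loop's step count (each step advances (i,j) in row-major order)
def scanA (hasil : List (List Int)) (n : Nat) : Nat → Nat → Nat → String
  | 0, _, _ => "No"
  | fuel+1, i, j =>
    if i < n then
      if (if i = j then (if pvIdx hasil i j ≠ 1 then 1 else 0)
          else (if pvIdx hasil i j ≠ 0 then 1 else 0)) = (1 : Nat) then "No"
      else if j = n - 1 then scanA hasil n fuel (i+1) 0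
      else scanA hasil n fuel i (j+1)
    else "Yes"

def cek_orthogonal (matriks : List (List Int)) : String :=
  let mat_trans := transposeA matriks
  let hasil := kaliMatriksA matriks mat_trans
  scanA hasil matriks.length (matriks.length * matriks.length + 1) 0 0

-- ===== PORT B =====
-- fused double loop; List.all short-circuits like Source B's early `return 'No'`
def cek_orthogonal_alt (matriks : List (List Int)) : String :=
  if (List.range matriks.length).all (fun i =>
       (List.range matriks.length).all (fun j =>
         ((List.range matriks.length).foldl
            (fun s k => s + pvIdx matriks i k * pvIdx matriks j k) 0)
           == (if i = j then (1 : Int) else 0)))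
  then "Yes" else "No"

-- ===== PRECONDITION & SPEC =====
-- Pre_ excludes exactly the inputs where Python A raises IndexError: a row shorter than the
-- number of rows (both programs only ever read columns k < len(matriks)).
def Pre_cek_orthogonal (matriks : List (List Int)) : Prop :=
  ∀ r ∈ matriks, matriks.length ≤ r.length
instance (matriks : List (List Int)) : Decidable (Pre_cek_orthogonal matriks) := by
  unfold Pre_cek_orthogonal; infer_instance

def pvWitness_cek_orthogonal : List (List Int) := [[1, 0], [0, 1]]

def Spec_cek_orthogonal (matriks : List (List Int)) (out : String) : Prop := out = cek_orthogonal_alt matriks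
instance (matriks : List (List Int)) (out : String) : Decidable (Spec_cek_orthogonal matriks out) := by unfold Spec_cek_orthogonal; infer_instance

-- ===== CLAIM (what is proved, stated in full; the proofs are below) =====
def Claim_equal_cek_orthogonal : Prop := ∀ (matriks : List (List Int)), Dom_cek_orthogonal matriks → Pre_cek_orthogonal matriks → Spec_cek_orthogonal matriks (cek_orthogonal matriks)

-- ===== LEMMAS AND PROOFS =====

lemma bool_eq_of_iff {a b : Bool} (h : a = true ↔ b = true) : a = b := by
  cases a <;> cases b <;> simp_all

-- cell (i,j) of the product table is "good" (1 on the diagonal, 0 off it)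
def goodH (h : List (List Int)) (i j : Nat) : Bool := pvIdx h i j == (if i = j then (1 : Int) else 0)

-- "all cells from (i,j) on, in row-major order, are good"
def RemB (h : List (List Int)) (n i j : Nat) : Bool :=
  ((List.range n).all fun j' => decide (j' < j) || goodH h i j') &&
  ((List.range n).all fun i' => decide (i' ≤ i) || (List.range n).all fun j' => goodH h i' j')

lemma good_out (h : List (List Int)) (i j : Nat) (hi : h.length ≤ i) (hij : i ≠ j) :
    goodH h i j = true := by
  simp [goodH, pvIdx, List.getD_eq_getElem?_getD, List.getElem?_eq_none (by omega : h.length ≤ i), hij]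

lemma check_eq_one_iff (h : List (List Int)) (i j : Nat) :
    ((if i = j then (if pvIdx h i j ≠ 1 then 1 else 0)
      else (if pvIdx h i j ≠ 0 then 1 else 0)) = (1 : Nat)) ↔ goodH h i j = false := by
  by_cases hij : i = j <;> simp [goodH, hij]

lemma scanA_eq (h : List (List Int)) (n : Nat) (hh : h.length = n) :
    ∀ fuel i j, i ≤ n → j < n → (n - i) * n - j + 1 ≤ fuel →
      scanA h n fuel i j = if RemB h n i j then "Yes" else "No" := by
  intro fuel
  induction fuel with
  | zero => intro i j _ _ hf; omega
  | succ fuel IH =>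
    intro i j hi hj hf
    by_cases hin : i < n
    · have hge : n ≤ (n - i) * n := Nat.le_mul_of_pos_left n (by omega)
      by_cases hg : goodH h i j = true
      · -- good cell: check stays 0, loop advances
        by_cases hjl : j = n - 1
        · have hstep : scanA h n (fuel+1) i j = scanA h n fuel (i+1) 0 := by
            simp only [scanA, if_pos hin, if_pos hjl]
            rw [if_neg (by rw [check_eq_one_iff]; simp [hg])]
          rw [hstep, IH (i+1) 0 (by omega) (by omega)
              (by have : (n - (i+1)) * n = (n - i) * n - n := by
                    rw [show n - (i+1) = (n - i) - 1 by omega, Nat.sub_one_mul]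
                  omega)]
          have hR : (RemB h n i j = true) ↔ (RemB h n (i+1) 0 = true) := by
            simp only [RemB, Bool.and_eq_true, List.all_eq_true, List.mem_range,
              Bool.or_eq_true, decide_eq_true_eq]
            constructor
            · rintro ⟨h1, h2⟩
              refine ⟨fun j' hj' => ?_, fun i' hi' => ?_⟩
              · by_cases hi1 : i + 1 < n
                · rcases h2 (i+1) hi1 with h' | h'
                  · omega
                  · exact Or.inr (h' j' hj')
                · exact Or.inr (good_out h (i+1) j' (by omega) (by omega))
              · by_cases hle : i' ≤ i + 1
                · exact Or.inl hle
                · rcases h2 i' hi' with h' | h'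
                  · omega
                  · exact Or.inr h'
            · rintro ⟨h1, h2⟩
              refine ⟨fun j' hj' => ?_, fun i' hi' => ?_⟩
              · by_cases hjj : j' < j
                · exact Or.inl hjj
                · have : j' = j := by omega
                  exact Or.inr (this ▸ hg)
              · by_cases hle : i' ≤ i
                · exact Or.inl hle
                · refine Or.inr (fun j' hj' => ?_)
                  by_cases he : i' = i + 1
                  · subst he; rcases h1 j' hj' with h' | h'
                    · omega
                    · exact h'
                  · rcases h2 i' hi' with h' | h'
                    · omega
                    · exact h' j' hj'
          rw [bool_eq_of_iff hR]
        · have hstep : scanA h n (fuel+1) i j = scanA h n fuel i (j+1) := by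
            simp only [scanA, if_pos hin, if_neg hjl]
            rw [if_neg (by rw [check_eq_one_iff]; simp [hg])]
          rw [hstep, IH i (j+1) hi (by omega) (by omega)]
          have hR : (RemB h n i j = true) ↔ (RemB h n i (j+1) = true) := by
            simp only [RemB, Bool.and_eq_true, List.all_eq_true, List.mem_range,
              Bool.or_eq_true, decide_eq_true_eq]
            constructor
            · rintro ⟨h1, h2⟩
              refine ⟨fun j' hj' => ?_, h2⟩
              rcases h1 j' hj' with h' | h'
              · exact Or.inl (by omega)
              · exact Or.inr h'
            · rintro ⟨h1, h2⟩
              refine ⟨fun j' hj' => ?_, h2⟩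
              by_cases hjj : j' < j
              · exact Or.inl hjj
              · by_cases he : j' = j
                · exact Or.inr (he ▸ hg)
                · rcases h1 j' hj' with h' | h'
                  · omega
                  · exact Or.inr h'
          rw [bool_eq_of_iff hR]
      · -- bad cell: check becomes 1, return "No"; RemB is false at (i,j)
        have hbad : RemB h n i j = false := by
          have : ¬ (RemB h n i j = true) := by
            simp only [RemB, Bool.and_eq_true, List.all_eq_true, List.mem_range,
              Bool.or_eq_true, decide_eq_true_eq]
            rintro ⟨h1, _⟩
            rcases h1 j hj with h' | h'
            · omega
            · exact hg h'
          cases hRB : RemB h n i j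
          · rfl
          · exact absurd hRB this
        have : scanA h n (fuel+1) i j = "No" := by
          simp only [scanA, if_pos hin]
          rw [if_pos (by rw [check_eq_one_iff]; simpa using hg)]
        rw [this, if_neg (by simp [hbad])]
    · -- i = n: loop ends with check = 0, "Yes"; all remaining cells are trivially good
      have hieq : i = n := by omega
      have hyes : scanA h n (fuel+1) i j = "Yes" := by simp [scanA, hin]
      have hRT : RemB h n i j = true := by
        simp only [RemB, Bool.and_eq_true, List.all_eq_true, List.mem_range,
          Bool.or_eq_true, decide_eq_true_eq]
        exact ⟨fun j' hj' => Or.inr (good_out h i j' (by omega) (by omega)),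
               fun i' hi' => Or.inl (by omega)⟩
      rw [hyes, if_pos hRT]

lemma hasil_entry (m : List (List Int)) (i j : Nat) (hi : i < m.length) (hj : j < m.length) :
    pvIdx (kaliMatriksA m (transposeA m)) i j
      = (List.range m.length).foldl (fun s k => s + pvIdx m i k * pvIdx m j k) 0 := by
  have hlen : (transposeA m).length = m.length := by simp [transposeA]
  have htr : ∀ k < m.length, pvIdx (transposeA m) k j = pvIdx m j k := by
    intro k hk
    simp [transposeA, pvIdx, List.getD_eq_getElem?_getD, hk, hj]
  have : pvIdx (kaliMatriksA m (transposeA m)) i j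
      = (List.range m.length).foldl (fun acc k => acc + pvIdx m i k * pvIdx (transposeA m) k j) 0 := by
    simp [kaliMatriksA, pvIdx, List.getD_eq_getElem?_getD, hi, hlen, hj]
  rw [this]
  apply PySem.List.foldl_congr_mem
  intro acc k hk
  rw [htr k (List.mem_range.mp hk)]

lemma hasil_length (m : List (List Int)) : (kaliMatriksA m (transposeA m)).length = m.length := by
  simp [kaliMatriksA]

-- ===== VERDICT (by name: the statement is the Claim_ definition above) =====
theorem cek_orthogonal_spec : Claim_equal_cek_orthogonal := by
  intro m _hdom _hpre
  unfold Spec_cek_orthogonal cek_orthogonal cek_orthogonal_alt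
  by_cases hn : m.length = 0
  · have : m = [] := List.eq_nil_of_length_eq_zero hn
    subst this; rfl
  · rw [scanA_eq _ _ (hasil_length m) _ 0 0 (by omega) (by omega) (by simp)]
    have hRA : (RemB (kaliMatriksA m (transposeA m)) m.length 0 0 = true)
        ↔ ((List.range m.length).all (fun i =>
             (List.range m.length).all (fun j =>
               ((List.range m.length).foldl
                  (fun s k => s + pvIdx m i k * pvIdx m j k) 0)
                 == (if i = j then (1 : Int) else 0))) = true) := by
      simp only [RemB, goodH, Bool.and_eq_true, List.all_eq_true, List.mem_range,
        Bool.or_eq_true, decide_eq_true_eq]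
      constructor
      · rintro ⟨h1, h2⟩ i hi j hj
        rw [← hasil_entry m i j hi hj]
        by_cases hi0 : i = 0
        · subst hi0
          rcases h1 j hj with h' | h'
          · omega
          · exact h'
        · rcases h2 i hi with h' | h'
          · omega
          · exact h' j hj
      · intro hall
        refine ⟨fun j' hj' => Or.inr ?_, fun i' hi' => ?_⟩
        · rw [hasil_entry m 0 j' (by omega) hj']; exact hall 0 (by omega) j' hj'
        · refine Or.inr (fun j' hj' => ?_)
          rw [hasil_entry m i' j' hi' hj']; exact hall i' hi' j' hj'
    rw [bool_eq_of_iff hRA]
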